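-- pv_equiv track=rewrite | github.com/dew-uff/dsmining | src/helpers/h3_utils.py | ext_split
-- ===== SOURCE A (Python) =====
-- def ext_split(values, ext):
--     split = values.split(ext + ";")
--     result = []
--     for i, name in enumerate(split):
--         if i != len(split) - 1:
--             result.append(name + ext)
--         else:
--             result.append(name)
--     return result
-- ===== SOURCE B (Python) =====
-- def ext_split(values, ext):
--     sep = ext + ";"
--     result = []
--     start = 0
--     while True:
--         idx = values.find(sep, start)
--         if idx == -1:
--             break
--         result.append(values[start:idx] + ext)
--         start = idx + len(sep)
--     result.append(values[start:])
--     return result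
-- ===== Notes on version B (the rewrite author's own statement) =====
-- stated objective: alternative
-- what changed: Replaces str.split plus an enumerate loop that re-appends ext to every piece but the last with a single index walk using str.find that emits each segment (with ext re-attached) directly, never materialising the intermediate split list.
import Mathlib
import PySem

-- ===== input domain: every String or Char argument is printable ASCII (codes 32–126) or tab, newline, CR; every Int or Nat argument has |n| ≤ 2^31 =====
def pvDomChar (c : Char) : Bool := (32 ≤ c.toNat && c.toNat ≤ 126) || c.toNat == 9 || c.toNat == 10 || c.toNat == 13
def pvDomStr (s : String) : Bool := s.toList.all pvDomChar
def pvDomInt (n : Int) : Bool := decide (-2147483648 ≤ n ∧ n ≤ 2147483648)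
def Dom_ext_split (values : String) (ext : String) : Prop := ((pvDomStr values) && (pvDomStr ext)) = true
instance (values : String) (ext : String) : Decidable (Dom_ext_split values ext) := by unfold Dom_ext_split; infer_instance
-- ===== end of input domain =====

-- B replaces str.split + an enumerate loop re-appending ext with a single str.find index walk
-- that emits each ext-terminated segment directly (alternative decomposition, same cost).

-- ===== PORT A =====
-- values.split(ext + ";"): the separator ends in ';' so it is never empty and str.split never
-- raises; PySem.Str.split? s sep = some (Chars.splitOn s.toList sep.toList) for nonempty sep,
-- so Chars.splitOn on the char lists is the exact split.
-- the result-building loop of A (split is the list str.split returned)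
def extSplitLoop (split : List (List Char)) (ext : List Char) : List (List Char) :=
  (PySem.List.enumerate split).foldl
    (fun result p =>
      if p.1 ≠ (split.length : Int) - 1 then result ++ [p.2 ++ ext]
      else result ++ [p.2]) []

def ext_split (values : String) (ext : String) : List String :=
  (extSplitLoop (PySem.Chars.splitOn values.toList (ext.toList ++ [';'])) ext.toList).map
    String.ofList

-- ===== PORT B =====
-- the while loop of Source B: idx = values.find(sep, start); values[start:idx] + ext per hit,
-- values[start:] as the final remainder
def extSplitAltGo (values : List Char) (ext : List Char) (start : Nat)
    (acc : List (List Char)) : List (List Char) :=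
  -- sep = ext + ";" and idx = values.find(sep, start) are inlined at each use
  if h : PySem.Chars.findFrom values (ext ++ [';']) (start : Int) = -1 then
    acc ++ [values.drop start]
  else
    extSplitAltGo values ext
      ((PySem.Chars.findFrom values (ext ++ [';']) (start : Int)).toNat + (ext ++ [';']).length)
      (acc ++ [PySem.Chars.slice values (some (start : Int))
                 (some (PySem.Chars.findFrom values (ext ++ [';']) (start : Int))) ++ ext])
  termination_by values.length + 1 - start
  decreasing_by
    have hk : start ≤ values.length := by
      by_contra hgt
      apply h
      simp only [PySem.Chars.findFrom]
      rw [if_pos (by push_cast; omega)]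
    rw [PySem.Chars.findFrom_natCast values (ext ++ [';']) start hk] at h ⊢
    split at h
    · exact absurd rfl h
    · rename_i hne
      have hge : (0:Int) ≤ PySem.Chars.find (values.drop start) (ext ++ [';']) := by
        have := PySem.Chars.neg_one_le_find (values.drop start) (ext ++ [';'])
        omega
      rw [if_neg hne]
      simp only [List.length_append, List.length_cons]
      omega

def ext_split_alt (values : String) (ext : String) : List String :=
  (extSplitAltGo values.toList ext.toList 0 []).map String.ofList

-- ===== PRECONDITION & SPEC =====
def Spec_ext_split (values : String) (ext : String) (out : List String) : Prop := out = ext_split_alt values ext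
instance (values : String) (ext : String) (out : List String) : Decidable (Spec_ext_split values ext out) := by unfold Spec_ext_split; infer_instance

-- ===== CLAIM (what is proved, stated in full; the proofs are below) =====
def Claim_equal_ext_split : Prop := ∀ (values : String) (ext : String), Dom_ext_split values ext → Spec_ext_split values ext (ext_split values ext)

-- ===== LEMMAS AND PROOFS =====

-- ext appended to every piece but the last: the common shape of both programs' output
def attachExt (ext : List Char) : List (List Char) → List (List Char)
  | [] => []
  | [p] => [p]
  | p :: q :: ps => (p ++ ext) :: attachExt ext (q :: ps)

theorem attachExt_cons (ext p : List Char) (ys : List (List Char)) (h : ys ≠ []) :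
    attachExt ext (p :: ys) = (p ++ ext) :: attachExt ext ys := by
  cases ys with
  | nil => exact absurd rfl h
  | cons q qs => rfl

-- one-step equations of splitOn.go
theorem go_nil (sep : List Char) (f : Nat) (cur : List Char) (acc : List (List Char)) :
    PySem.Chars.splitOn.go sep (f+1) [] cur acc = (cur.reverse :: acc).reverse := by
  rw [PySem.Chars.splitOn.go]
  omega

theorem go_cons (sep : List Char) (f : Nat) (c : Char) (rest cur : List Char)
    (acc : List (List Char)) :
    PySem.Chars.splitOn.go sep (f+1) (c::rest) cur acc =
      if sep.isPrefixOf (c::rest) = true then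
        PySem.Chars.splitOn.go sep f (List.drop sep.length (c::rest)) [] (cur.reverse :: acc)
      else PySem.Chars.splitOn.go sep f rest (c :: cur) acc := by
  rw [PySem.Chars.splitOn.go]

-- splitOn.go, fuel and accumulators eliminated
theorem splitOn_go_eq (sep : List Char) (hsep : sep ≠ []) :
    ∀ n l, l.length = n → ∀ (fuel : Nat) (cur : List Char) (acc : List (List Char)),
      l.length < fuel →
      PySem.Chars.splitOn.go sep fuel l cur acc =
        acc.reverse ++ List.modifyHead (cur.reverse ++ ·) (PySem.Chars.splitOn l sep) := by
  intro n
  induction n using Nat.strong_induction_on with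
  | _ n ih =>
    intro l hl fuel cur acc hfuel
    have hsl : 1 ≤ sep.length := by
      cases sep with
      | nil => exact absurd rfl hsep
      | cons a b => simp
    cases fuel with
    | zero => omega
    | succ f =>
      cases l with
      | nil =>
        rw [go_nil]
        simp only [PySem.Chars.splitOn, List.length_nil]
        rw [go_nil]
        simp
      | cons c rest =>
        simp only [List.length_cons] at hl hfuel
        rw [go_cons]
        simp only [PySem.Chars.splitOn, List.length_cons]
        rw [go_cons]
        by_cases hp : sep.isPrefixOf (c::rest) = true
        · rw [if_pos hp, if_pos hp]
          have hdlt : (List.drop sep.length (c::rest)).length < n := by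
            simp only [List.length_drop, List.length_cons]
            omega
          rw [ih _ hdlt _ rfl f [] (cur.reverse :: acc) (by omega),
              ih _ hdlt _ rfl (rest.length + 1) [] ([].reverse :: [])
                (by simp only [List.length_drop, List.length_cons]; omega)]
          cases PySem.Chars.splitOn (List.drop sep.length (c::rest)) sep with
          | nil => simp
          | cons x xs => simp
        · rw [if_neg hp, if_neg hp]
          have hrlt : rest.length < n := by omega
          rw [ih _ hrlt _ rfl f (c :: cur) acc (by omega),
              ih _ hrlt _ rfl (rest.length + 1) [c] [] (by omega)]
          cases PySem.Chars.splitOn rest sep with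
          | nil => simp
          | cons x xs => simp

theorem splitOn_nil (sep : List Char) (hsep : sep ≠ []) :
    PySem.Chars.splitOn [] sep = [[]] := by
  simp only [PySem.Chars.splitOn, List.length_nil]
  rw [go_nil]
  simp

theorem splitOn_prefix (sep : List Char) (hsep : sep ≠ []) (l : List Char) (hl : l ≠ [])
    (hp : sep <+: l) :
    PySem.Chars.splitOn l sep = [] :: PySem.Chars.splitOn (l.drop sep.length) sep := by
  have hsl : 1 ≤ sep.length := by
    cases sep with
    | nil => exact absurd rfl hsep
    | cons a b => simp
  cases l with
  | nil => exact absurd rfl hl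
  | cons c rest =>
    rw [show PySem.Chars.splitOn (c::rest) sep =
        PySem.Chars.splitOn.go sep (rest.length + 1 + 1) (c::rest) [] [] from rfl]
    rw [go_cons, if_pos (List.isPrefixOf_iff_prefix.mpr hp)]
    simp only [List.reverse_nil]
    rw [splitOn_go_eq sep hsep _ _ rfl _ [] [[]]
        (by simp only [List.length_drop, List.length_cons]; omega)]
    cases PySem.Chars.splitOn (List.drop sep.length (c::rest)) sep with
    | nil => simp
    | cons x xs => simp

theorem splitOn_not_prefix (sep : List Char) (hsep : sep ≠ []) (c : Char) (rest : List Char)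
    (hp : ¬ sep <+: (c :: rest)) :
    PySem.Chars.splitOn (c :: rest) sep =
      List.modifyHead (c :: ·) (PySem.Chars.splitOn rest sep) := by
  rw [show PySem.Chars.splitOn (c::rest) sep =
      PySem.Chars.splitOn.go sep (rest.length + 1 + 1) (c::rest) [] [] from rfl]
  rw [go_cons, if_neg (by simpa using fun hx => hp (List.isPrefixOf_iff_prefix.mp hx))]
  rw [splitOn_go_eq sep hsep _ _ rfl _ [c] [] (by omega)]
  cases PySem.Chars.splitOn rest sep with
  | nil => simp
  | cons x xs => simp

theorem splitOn_ne_nil (sep : List Char) (hsep : sep ≠ []) (l : List Char) :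
    PySem.Chars.splitOn l sep ≠ [] := by
  suffices h : ∀ n (l : List Char), l.length = n → PySem.Chars.splitOn l sep ≠ [] from
    h _ l rfl
  intro n
  induction n using Nat.strong_induction_on with
  | _ n ih =>
    intro l hl
    cases l with
    | nil => rw [splitOn_nil sep hsep]; simp
    | cons c rest =>
      by_cases hp : sep <+: (c :: rest)
      · rw [splitOn_prefix sep hsep _ (by simp) hp]; simp
      · rw [splitOn_not_prefix sep hsep c rest hp]
        have h2 := ih rest.length (by simp at hl; omega) rest rfl
        cases h3 : PySem.Chars.splitOn rest sep with
        | nil => exact absurd h3 h2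
        | cons x xs => simp

theorem splitOn_of_not_infix (sep : List Char) (hsep : sep ≠ []) (l : List Char)
    (h : ¬ sep <:+: l) : PySem.Chars.splitOn l sep = [l] := by
  induction l with
  | nil => exact splitOn_nil sep hsep
  | cons c rest ih =>
    rw [splitOn_not_prefix sep hsep c rest (fun hp => h hp.isInfix)]
    rw [ih (fun hi => h (List.infix_cons hi))]
    simp

theorem splitOn_first_occ (sep : List Char) (hsep : sep ≠ []) :
    ∀ (r : Nat) (t : List Char), sep <+: t.drop r → (∀ i, i < r → ¬ sep <+: t.drop i) →
      PySem.Chars.splitOn t sep =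
        t.take r :: PySem.Chars.splitOn (t.drop (r + sep.length)) sep := by
  intro r
  induction r with
  | zero =>
    intro t hocc _
    simp only [List.drop_zero] at hocc
    cases t with
    | nil => exact absurd (List.prefix_nil.mp hocc) hsep
    | cons c rest =>
      rw [splitOn_prefix sep hsep _ (by simp) hocc]
      simp
  | succ r ih =>
    intro t hocc hmin
    cases t with
    | nil => exact absurd (List.prefix_nil.mp (by simpa using hocc)) hsep
    | cons c rest =>
      rw [splitOn_not_prefix sep hsep c rest (by simpa using hmin 0 (by omega))]
      rw [ih rest (by simpa using hocc)
          (fun i hi => by simpa using hmin (i+1) (by omega))]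
      have harith : r + 1 + sep.length = (r + sep.length) + 1 := by omega
      rw [harith, List.drop_succ_cons]
      simp

-- the enumerate foldl of port A is attachExt
theorem foldA (ext : List Char) (n : Int) :
    ∀ (xs : List (List Char)) (s : Int) (acc : List (List Char)), n = s + xs.length →
      (PySem.List.enumerate xs s).foldl
        (fun result p => if p.1 ≠ n - 1 then result ++ [p.2 ++ ext] else result ++ [p.2]) acc
      = acc ++ attachExt ext xs := by
  intro xs
  induction xs with
  | nil => intro s acc _; simp [PySem.List.enumerate_nil, attachExt]
  | cons p xs ih =>
    intro s acc hn
    rw [PySem.List.enumerate_cons]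
    simp only [List.length_cons] at hn
    cases xs with
    | nil =>
      simp only [PySem.List.enumerate_nil, List.foldl_cons, List.foldl_nil]
      have h2 : n = s + 1 := by simpa using hn
      rw [if_neg (by omega)]
      simp [attachExt]
    | cons q qs =>
      simp only [List.foldl_cons]
      have h2 : n = s + (qs.length : Int) + 2 := by
        simp only [List.length_cons] at hn
        push_cast at hn ⊢
        omega
      rw [if_pos (by omega)]
      rw [ih (s+1) (acc ++ [p ++ ext]) (by

        simp only [List.length_cons]
        push_cast
        omega)]
      rw [attachExt_cons ext p (q :: qs) (by simp)]
      simp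

-- the find walk of port B is attachExt of splitOn of the remaining suffix
theorem goB (values ext : List Char) :
    ∀ (fuelm : Nat) (start : Nat) (acc : List (List Char)),
      values.length + 1 - start ≤ fuelm →
      extSplitAltGo values ext start acc =
        acc ++ attachExt ext (PySem.Chars.splitOn (values.drop start) (ext ++ [';'])) := by
  have hsep : ext ++ [';'] ≠ [] := by simp
  have hsl : 1 ≤ (ext ++ [';']).length := by simp
  intro fuelm
  induction fuelm with
  | zero =>
    intro start acc hf
    have hgt : values.length < start := by omega
    rw [extSplitAltGo, dif_pos (by
      simp only [PySem.Chars.findFrom]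
      rw [if_pos (by push_cast; omega)])]
    rw [List.drop_eq_nil_of_le (by omega), splitOn_nil _ hsep]
    simp [attachExt]
  | succ f ih =>
    intro start acc hf
    rw [extSplitAltGo]
    by_cases hidx : PySem.Chars.findFrom values (ext ++ [';']) (start : Int) = -1
    · rw [dif_pos hidx]
      by_cases hk : start ≤ values.length
      · rw [PySem.Chars.findFrom_natCast values (ext ++ [';']) start hk] at hidx
        split at hidx
        · rename_i hfind
          rw [splitOn_of_not_infix _ hsep _
              ((PySem.Chars.find_eq_neg_one_iff _ _).mp hfind)]
          simp [attachExt]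
        · rename_i hfind
          exfalso
          have := PySem.Chars.neg_one_le_find (values.drop start) (ext ++ [';'])
          omega
      · rw [List.drop_eq_nil_of_le (by omega), splitOn_nil _ hsep]
        simp [attachExt]
    · rw [dif_neg hidx]
      have hk : start ≤ values.length := by
        by_contra hgt
        apply hidx
        simp only [PySem.Chars.findFrom]
        rw [if_pos (by push_cast; omega)]
      rw [PySem.Chars.findFrom_natCast values (ext ++ [';']) start hk] at hidx ⊢
      split at hidx
      · exact absurd rfl hidx
      · rename_i hfind
        have hge : (0:Int) ≤ PySem.Chars.find (values.drop start) (ext ++ [';']) := by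
          have := PySem.Chars.neg_one_le_find (values.drop start) (ext ++ [';'])
          omega
        obtain ⟨hocc, hmin⟩ := PySem.Chars.find_spec hge
        set r := PySem.Chars.find (values.drop start) (ext ++ [';']) with hr
        rw [if_neg hfind]
        have htoNat : ((start : Int) + r).toNat = start + r.toNat := by omega
        have hsplit := splitOn_first_occ (ext ++ [';']) hsep r.toNat (values.drop start)
          hocc hmin
        have hdd : (values.drop start).drop (r.toNat + (ext ++ [';']).length) =
            values.drop (start + r.toNat + (ext ++ [';']).length) := by
          rw [List.drop_drop]; ring_nf
        have hslice : PySem.Chars.slice values (some (start : Int)) (some ((start : Int) + r)) =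
            (values.drop start).take r.toNat := by
          show PySem.List.slice values (some (start : Int)) (some ((start : Int) + r)) = _
          rw [PySem.List.slice_toNat values (by omega) (by omega)]
          congr 1
          omega
        rw [htoNat, ih (start + r.toNat + (ext ++ [';']).length) _ (by omega)]
        rw [hsplit, hdd, hslice]
        rw [attachExt_cons ext _ _ (splitOn_ne_nil _ hsep _)]
        simp

-- ===== VERDICT (by name: the statement is the Claim_ definition above) =====
theorem ext_split_spec : Claim_equal_ext_split := by
  intro values ext _
  unfold Spec_ext_split ext_split ext_split_alt extSplitLoop
  rw [goB values.toList ext.toList (values.toList.length + 1) 0 [] (by omega)]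
  rw [foldA ext.toList _ _ 0 [] (by simp)]
  simp
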